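-- pv_equiv track=rewrite | github.com/mad462/QuickShakePic | tools/fix_bmp_bitdepth.py | collect_used_colors
-- ===== SOURCE A (Python) =====
-- def collect_used_colors(
--     palette: list[tuple[int, int, int]],
--     rows: list[list[int]],
-- ) -> tuple[list[tuple[int, int, int]], list[list[int]]]:
--     color_to_index: dict[tuple[int, int, int], int] = {}
--     remapped_rows: list[list[int]] = []
--     compact_palette: list[tuple[int, int, int]] = []
--
--     for row in rows:
--         remapped_row: list[int] = []
--         for value in row:
--             if palette:
--                 color = palette[value]
--             else:
--                 color = ((value >> 16) & 0xFF, (value >> 8) & 0xFF, value & 0xFF)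
--
--             if color not in color_to_index:
--                 color_to_index[color] = len(compact_palette)
--                 compact_palette.append(color)
--             remapped_row.append(color_to_index[color])
--         remapped_rows.append(remapped_row)
--
--     return compact_palette, remapped_rows
-- ===== SOURCE B (Python) =====
-- def collect_used_colors(
--     palette: list[tuple[int, int, int]],
--     rows: list[list[int]],
-- ) -> tuple[list[tuple[int, int, int]], list[list[int]]]:
--     # Phase 1: resolve every pixel to its RGB color (palette branch decided once).
--     if palette:
--         color_grid = [[palette[v] for v in row] for row in rows]
--     else:
--         color_grid = [[((v >> 16) & 0xFF, (v >> 8) & 0xFF, v & 0xFF) for v in row]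
--                       for row in rows]
--     # Phase 2: compact palette = colors in first-appearance order.
--     compact_palette = list(dict.fromkeys(c for row in color_grid for c in row))
--     # Phase 3: remap each pixel to its index in the compact palette.
--     remapped_rows = [[compact_palette.index(c) for c in row] for row in color_grid]
--     return compact_palette, remapped_rows
-- ===== Notes on version B (the rewrite author's own statement) =====
-- stated objective: alternative
-- what changed: A does one nested pass maintaining a color-to-index dict, a growing palette and the remapped rows simultaneously; B is three separate phases: resolve all pixels to colors, deduplicate with dict.fromkeys to get the compact palette, then map each color to its palette index.
import Mathlib
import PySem

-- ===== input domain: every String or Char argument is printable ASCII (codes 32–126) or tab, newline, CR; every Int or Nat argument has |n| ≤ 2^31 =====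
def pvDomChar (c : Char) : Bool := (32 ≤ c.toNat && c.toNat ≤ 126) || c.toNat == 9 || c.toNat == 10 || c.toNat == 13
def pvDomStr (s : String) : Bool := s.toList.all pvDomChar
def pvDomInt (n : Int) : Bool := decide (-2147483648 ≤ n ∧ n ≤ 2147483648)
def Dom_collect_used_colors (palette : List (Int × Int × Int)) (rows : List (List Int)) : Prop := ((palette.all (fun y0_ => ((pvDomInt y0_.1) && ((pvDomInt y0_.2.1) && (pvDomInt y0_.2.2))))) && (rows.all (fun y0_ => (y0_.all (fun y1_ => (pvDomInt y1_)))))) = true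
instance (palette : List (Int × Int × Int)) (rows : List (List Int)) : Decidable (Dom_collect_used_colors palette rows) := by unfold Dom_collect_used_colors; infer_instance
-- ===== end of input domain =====

-- B replaces A's single nested pass (dict + palette + rows maintained together) by three
-- phases: resolve pixels to colors, dedup to the compact palette, then index-map (alternative
-- decomposition, no speed claim).

-- ===== PORT A =====
-- single nested pass: state = (color_to_index, remapped_rows, compact_palette)
def collect_used_colors (palette : List (Int × Int × Int)) (rows : List (List Int)) : (List (Int × Int × Int)) × List (List Int) :=
  let fin := rows.foldl
    (fun (st : PySem.Dict (Int × Int × Int) Int × List (List Int) × List (Int × Int × Int)) row =>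
      let inner := row.foldl
        (fun (st2 : PySem.Dict (Int × Int × Int) Int × List Int × List (Int × Int × Int)) value =>
          let color : Int × Int × Int :=
            if palette ≠ [] then (PySem.List.pyGet? palette value).getD (0, 0, 0)
            else (PySem.Int.band (value >>> 16) 255, PySem.Int.band (value >>> 8) 255,
                  PySem.Int.band value 255)
          let d' := if st2.1.contains color then st2.1
                    else st2.1.insert color (st2.2.2.length : Int)
          let compact' := if st2.1.contains color then st2.2.2 else st2.2.2 ++ [color]
          (d', st2.2.1 ++ [d'.getD color 0], compact'))
        (st.1, ([] : List Int), st.2.2)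
      (inner.1, st.2.1 ++ [inner.2.1], inner.2.2))
    (PySem.Dict.empty, ([] : List (List Int)), ([] : List (Int × Int × Int)))
  (fin.2.2, fin.2.1)

-- ===== PORT B =====
def collect_used_colors_alt (palette : List (Int × Int × Int)) (rows : List (List Int)) : (List (Int × Int × Int)) × List (List Int) :=
  let color_grid : List (List (Int × Int × Int)) :=
    if palette ≠ [] then
      rows.map (fun row => row.map (fun v => (PySem.List.pyGet? palette v).getD (0, 0, 0)))
    else
      rows.map (fun row => row.map (fun (v : Int) =>
        (PySem.Int.band (v >>> 16) 255, PySem.Int.band (v >>> 8) 255, PySem.Int.band v 255)))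
  let compact_palette := PySem.List.dedup (color_grid.flatMap id)
  let remapped_rows := color_grid.map (fun row =>
    row.map (fun c => ((PySem.List.index? compact_palette c).getD 0 : Int)))
  (compact_palette, remapped_rows)

-- ===== PRECONDITION & SPEC =====
-- Pre_ excludes exactly the inputs where Python A raises IndexError: a nonempty palette
-- with some pixel value outside Python's index range for it (B raises there too).
def Pre_collect_used_colors (palette : List (Int × Int × Int)) (rows : List (List Int)) : Prop :=
  palette = [] ∨ ∀ row ∈ rows, ∀ v ∈ row, -(palette.length : Int) ≤ v ∧ v < (palette.length : Int)
instance (palette : List (Int × Int × Int)) (rows : List (List Int)) : Decidable (Pre_collect_used_colors palette rows) := by unfold Pre_collect_used_colors; infer_instance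
def pvWitness_collect_used_colors : (List (Int × Int × Int)) × List (List Int) :=
  ([(1, 2, 3), (4, 5, 6)], [[0, 1, -1], [1, 1], []])
def Spec_collect_used_colors (palette : List (Int × Int × Int)) (rows : List (List Int)) (out : (List (Int × Int × Int)) × List (List Int)) : Prop := out = collect_used_colors_alt palette rows
instance (palette : List (Int × Int × Int)) (rows : List (List Int)) (out : (List (Int × Int × Int)) × List (List Int)) : Decidable (Spec_collect_used_colors palette rows out) := by unfold Spec_collect_used_colors; infer_instance

-- ===== CLAIM (what is proved, stated in full; the proofs are below) =====
def Claim_equal_collect_used_colors : Prop := ∀ (palette : List (Int × Int × Int)) (rows : List (List Int)), Dom_collect_used_colors palette rows → Pre_collect_used_colors palette rows → Spec_collect_used_colors palette rows (collect_used_colors palette rows)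

-- ===== LEMMAS AND PROOFS =====

-- the per-pixel color resolution both programs perform
def resC (palette : List (Int × Int × Int)) (value : Int) : Int × Int × Int :=
  if palette ≠ [] then (PySem.List.pyGet? palette value).getD (0, 0, 0)
  else (PySem.Int.band (value >>> 16) 255, PySem.Int.band (value >>> 8) 255,
        PySem.Int.band value 255)

-- A's inner step, on the already-resolved color
def stepC (st2 : PySem.Dict (Int × Int × Int) Int × List Int × List (Int × Int × Int))
    (color : Int × Int × Int) :
    PySem.Dict (Int × Int × Int) Int × List Int × List (Int × Int × Int) :=
  let d' := if st2.1.contains color then st2.1 else st2.1.insert color (st2.2.2.length : Int)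
  let compact' := if st2.1.contains color then st2.2.2 else st2.2.2 ++ [color]
  (d', st2.2.1 ++ [d'.getD color 0], compact')

-- invariant tying A's dict to its compact palette
def DInv (d : PySem.Dict (Int × Int × Int) Int) (s : List (Int × Int × Int)) : Prop :=
  s.Nodup ∧ (∀ c, d.contains c = true ↔ c ∈ s) ∧
    (∀ c ∈ s, d.getD c 0 = ((PySem.List.index? s c).getD 0 : Int))

theorem index_stable {s t : List (Int × Int × Int)} {c : Int × Int × Int} (hc : c ∈ s) :
    PySem.List.index? (PySem.Set.update s t) c = PySem.List.index? s c := by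
  rw [PySem.Set.update_eq_append_filter]
  exact PySem.List.index?_append_of_mem _ hc

theorem inner_spec (cs : List (Int × Int × Int)) :
    ∀ d racc s, DInv d s →
      cs.foldl stepC (d, racc, s) =
        ((cs.foldl stepC (d, racc, s)).1,
         racc ++ cs.map (fun c =>
           ((PySem.List.index? (PySem.Set.update s cs) c).getD 0 : Int)),
         PySem.Set.update s cs) ∧
      DInv (cs.foldl stepC (d, racc, s)).1 (PySem.Set.update s cs) := by
  induction cs with
  | nil => intro d racc s h; simpa [PySem.Set.update] using h
  | cons c cs ih =>
    intro d racc s h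
    obtain ⟨hnd, hcont, hidx⟩ := h
    by_cases hm : c ∈ s
    · have hc : d.contains c = true := (hcont c).mpr hm
      have hstep : stepC (d, racc, s) c = (d, racc ++ [d.getD c 0], s) := by
        simp [stepC, hc]
      have hupd : PySem.Set.update s (c :: cs) = PySem.Set.update s cs := by
        rw [PySem.Set.update_cons, PySem.Set.add_of_mem hm]
      have := ih d (racc ++ [d.getD c 0]) s ⟨hnd, hcont, hidx⟩
      rw [List.foldl_cons, hstep, hupd]
      refine ⟨?_, this.2⟩
      rw [this.1]
      refine Prod.ext rfl (Prod.ext ?_ rfl)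
      simp only [List.map_cons, List.append_assoc, List.singleton_append]
      congr 2
      rw [hidx c hm, index_stable hm]
    · have hc : d.contains c = false := by
        cases hcc : d.contains c
        · rfl
        · exact absurd ((hcont c).mp hcc) hm
      have hgd : (d.insert c (s.length : Int)).getD c 0 = (s.length : Int) :=
        PySem.Dict.getD_insert_self d c (s.length : Int) 0
      have hstep : stepC (d, racc, s) c =
          (d.insert c (s.length : Int), racc ++ [(s.length : Int)], s ++ [c]) := by
        simp [stepC, hc, hgd]
      have hnd' : (s ++ [c]).Nodup :=
        hnd.append (List.nodup_singleton c) (List.disjoint_singleton.mpr hm)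
      have hcont' : ∀ c', (d.insert c (s.length : Int)).contains c' = true ↔ c' ∈ s ++ [c] := by
        intro c'
        rw [PySem.Dict.contains_insert]
        simp only [Bool.or_eq_true, beq_iff_eq, List.mem_append, List.mem_singleton]
        rw [hcont c']
        tauto
      have hidx' : ∀ c' ∈ s ++ [c],
          (d.insert c (s.length : Int)).getD c' 0 =
            ((PySem.List.index? (s ++ [c]) c').getD 0 : Int) := by
        intro c' hc'
        rcases List.mem_append.mp hc' with h1 | h1
        · have hne : c' ≠ c := fun he => hm (he ▸ h1)
          rw [PySem.Dict.getD_insert_of_ne _ _ _ hne,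
            PySem.List.index?_append_of_mem _ h1]
          exact hidx c' h1
        · have he : c' = c := List.mem_singleton.mp h1
          subst he
          rw [hgd, PySem.List.index?_append_singleton_self _ _ hm]
          rfl
      have hInv' : DInv (d.insert c (s.length : Int)) (s ++ [c]) := ⟨hnd', hcont', hidx'⟩
      have hupd : PySem.Set.update s (c :: cs) = PySem.Set.update (s ++ [c]) cs := by
        rw [PySem.Set.update_cons, PySem.Set.add_of_not_mem hm]
      have := ih (d.insert c (s.length : Int)) (racc ++ [(s.length : Int)]) (s ++ [c]) hInv'
      rw [List.foldl_cons, hstep, hupd]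
      refine ⟨?_, this.2⟩
      rw [this.1]
      refine Prod.ext rfl (Prod.ext ?_ rfl)
      simp only [List.map_cons, List.append_assoc, List.singleton_append]
      congr 2
      have hcm : c ∈ s ++ [c] := by simp
      rw [index_stable hcm, PySem.List.index?_append_singleton_self _ _ hm]
      rfl

-- A's outer step, on the already-resolved row of colors
def stepR (st : PySem.Dict (Int × Int × Int) Int × List (List Int) × List (Int × Int × Int))
    (row : List (Int × Int × Int)) :
    PySem.Dict (Int × Int × Int) Int × List (List Int) × List (Int × Int × Int) :=
  let inner := row.foldl stepC (st.1, ([] : List Int), st.2.2)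
  (inner.1, st.2.1 ++ [inner.2.1], inner.2.2)

theorem outer_spec (rss : List (List (Int × Int × Int))) :
    ∀ d acc s, DInv d s →
      rss.foldl stepR (d, acc, s) =
        ((rss.foldl stepR (d, acc, s)).1,
         acc ++ rss.map (fun row => row.map (fun c =>
           ((PySem.List.index? (PySem.Set.update s rss.flatten) c).getD 0 : Int))),
         PySem.Set.update s rss.flatten) := by
  induction rss with
  | nil => intro d acc s _; simp [PySem.Set.update]
  | cons row rest ih =>
    intro d acc s h
    have hin := inner_spec row d [] s h
    have hstep : stepR (d, acc, s) row =
        ((row.foldl stepC (d, [], s)).1,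
         acc ++ [row.map (fun c =>
           ((PySem.List.index? (PySem.Set.update s row) c).getD 0 : Int))],
         PySem.Set.update s row) := by
      unfold stepR
      rw [hin.1]
      simp
    have := ih (row.foldl stepC (d, [], s)).1
      (acc ++ [row.map (fun c =>
        ((PySem.List.index? (PySem.Set.update s row) c).getD 0 : Int))])
      (PySem.Set.update s row) hin.2
    rw [List.foldl_cons, hstep, this]
    have hflat : PySem.Set.update (PySem.Set.update s row) rest.flatten =
        PySem.Set.update s (row :: rest).flatten := by
      rw [List.flatten_cons, PySem.Set.update_append]
    refine Prod.ext rfl (Prod.ext ?_ (by rw [hflat]))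
    rw [hflat]
    simp only [List.map_cons, List.append_assoc, List.singleton_append]
    congr 2
    apply List.map_congr_left
    intro c hc
    have hcm : c ∈ PySem.Set.update s row := (PySem.Set.mem_update _ _ _).mpr (Or.inr hc)
    calc ((PySem.List.index? (PySem.Set.update s row) c).getD 0 : Int)
        = ((PySem.List.index? (PySem.Set.update (PySem.Set.update s row) rest.flatten) c).getD 0 : Int) := by
          rw [index_stable hcm]
      _ = _ := by rw [hflat]

theorem inv_empty : DInv PySem.Dict.empty [] := by
  refine ⟨List.nodup_nil, ?_, ?_⟩
  · intro c; simp [PySem.Dict.contains_empty]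
  · intro c hc; simp at hc

theorem collect_used_colors_spec : Claim_equal_collect_used_colors := by
  intro palette rows _ _
  unfold Spec_collect_used_colors
  have hfun : (fun (st : PySem.Dict (Int × Int × Int) Int × List (List Int) × List (Int × Int × Int)) (row : List Int) =>
      let inner := row.foldl
        (fun (st2 : PySem.Dict (Int × Int × Int) Int × List Int × List (Int × Int × Int)) value =>
          let color : Int × Int × Int :=
            if palette ≠ [] then (PySem.List.pyGet? palette value).getD (0, 0, 0)
            else (PySem.Int.band (value >>> 16) 255, PySem.Int.band (value >>> 8) 255,
                  PySem.Int.band value 255)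
          let d' := if st2.1.contains color then st2.1
                    else st2.1.insert color (st2.2.2.length : Int)
          let compact' := if st2.1.contains color then st2.2.2 else st2.2.2 ++ [color]
          (d', st2.2.1 ++ [d'.getD color 0], compact'))
        (st.1, ([] : List Int), st.2.2)
      (inner.1, st.2.1 ++ [inner.2.1], inner.2.2)) =
      (fun st row => stepR st (row.map (resC palette))) := by
    funext st row
    unfold stepR
    rw [List.foldl_map]
    rfl
  have hA : collect_used_colors palette rows =
      (let fin := (rows.map (List.map (resC palette))).foldl stepR
          (PySem.Dict.empty, ([] : List (List Int)), ([] : List (Int × Int × Int)));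
        (fin.2.2, fin.2.1)) := by
    unfold collect_used_colors
    rw [hfun, ← List.foldl_map]
  have hgrid : (if palette ≠ [] then
        rows.map (fun row => row.map (fun v => (PySem.List.pyGet? palette v).getD (0, 0, 0)))
      else
        rows.map (fun row => row.map (fun (v : Int) =>
          (PySem.Int.band (v >>> 16) 255, PySem.Int.band (v >>> 8) 255, PySem.Int.band v 255)))) =
      rows.map (List.map (resC palette)) := by
    by_cases hp : palette = [] <;> simp [resC, hp]
  have hB : collect_used_colors_alt palette rows =
      (PySem.List.dedup ((rows.map (List.map (resC palette))).flatMap id),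
       (rows.map (List.map (resC palette))).map (fun row =>
         row.map (fun c =>
           ((PySem.List.index? (PySem.List.dedup ((rows.map (List.map (resC palette))).flatMap id)) c).getD 0 : Int)))) := by
    unfold collect_used_colors_alt
    rw [hgrid]
  set grid := rows.map (List.map (resC palette)) with hgdef
  have hout := outer_spec grid PySem.Dict.empty [] [] inv_empty
  have hset : PySem.Set.update ([] : List (Int × Int × Int)) grid.flatten =
      PySem.List.dedup grid.flatten := by
    rw [PySem.Set.update_nil_left, PySem.List.dedup_eq_ofList]
  rw [hA, hB, List.flatMap_id]
  show ((grid.foldl stepR (PySem.Dict.empty, [], [])).2.2,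
        (grid.foldl stepR (PySem.Dict.empty, [], [])).2.1) = _
  rw [hout, hset]
  simp
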